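-- pv_equiv track=rewrite | github.com/bw5io/aoc2023 | day13/sol_1.py | parse
-- ===== SOURCE A (Python) =====
-- def parse(input_list):
--     all_matrices = []
--     current_matrix = []
--     for i in input_list:
--         if i=="":
--             all_matrices.append(current_matrix)
--             current_matrix=[]
--         else:
--             current_matrix.append(i)
--     return all_matrices
-- ===== SOURCE B (Python) =====
-- def parse(input_list):
--     seps = [i for i, line in enumerate(input_list) if line == ""]
--     result = []
--     prev = -1
--     for s in seps:
--         result.append(input_list[prev + 1:s])
--         prev = s
--     return result
-- ===== Notes on version B (the rewrite author's own statement) =====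
-- stated objective: alternative
-- what changed: B first scans once for the indices of blank separator lines and then emits one slice per separator (previous boundary+1 up to the separator), instead of A's single accumulator loop that grows the current group line by line.
import Mathlib
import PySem

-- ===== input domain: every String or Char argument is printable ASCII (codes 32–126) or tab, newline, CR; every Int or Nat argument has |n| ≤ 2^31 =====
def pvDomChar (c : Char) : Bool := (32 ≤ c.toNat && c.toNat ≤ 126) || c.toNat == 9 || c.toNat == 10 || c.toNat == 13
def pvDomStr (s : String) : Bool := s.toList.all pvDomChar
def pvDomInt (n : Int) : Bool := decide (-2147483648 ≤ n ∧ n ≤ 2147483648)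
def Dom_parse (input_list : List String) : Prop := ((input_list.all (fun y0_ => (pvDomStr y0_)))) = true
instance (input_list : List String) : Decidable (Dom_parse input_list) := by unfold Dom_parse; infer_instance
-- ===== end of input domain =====

-- B gathers the blank-line indices first and then emits one slice per separator, instead of
-- A's accumulator loop; same return value on every input (objective: alternative decomposition).

-- ===== PORT A =====
def parse (input_list : List String) : List (List String) :=
  (input_list.foldl
    (fun (st : List (List String) × List String) i =>
      if i = "" then (st.1 ++ [st.2], ([] : List String))
      else (st.1, st.2 ++ [i]))
    (([] : List (List String)), ([] : List String))).1

-- ===== PORT B =====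
def parse_alt (input_list : List String) : List (List String) :=
  let seps : List Int :=
    ((PySem.List.enumerate input_list 0).filter (fun p => p.2 = "")).map (·.1)
  (seps.foldl
    (fun (st : List (List String) × Int) s =>
      (st.1 ++ [PySem.List.slice input_list (some (st.2 + 1)) (some s)], s))
    (([] : List (List String)), (-1 : Int))).1

-- ===== PRECONDITION & SPEC =====
def Spec_parse (input_list : List String) (out : List (List String)) : Prop := out = parse_alt input_list
instance (input_list : List String) (out : List (List String)) : Decidable (Spec_parse input_list out) := by unfold Spec_parse; infer_instance

-- ===== CLAIM (what is proved, stated in full; the proofs are below) =====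
def Claim_equal_parse : Prop := ∀ (input_list : List String), Dom_parse input_list → Spec_parse input_list (parse input_list)

-- ===== LEMMAS AND PROOFS =====

-- prepend `cur` to the first group, if any
def pvCur (cur : List String) : List (List String) → List (List String)
  | [] => []
  | g :: gs => (cur ++ g) :: gs

lemma pvCur_nil_left (r : List (List String)) : pvCur [] r = r := by
  cases r <;> simp [pvCur]

lemma pvCur_append (a b : List String) (r : List (List String)) :
    pvCur (a ++ b) r = pvCur a (pvCur b r) := by
  cases r <;> simp [pvCur]

-- Reference splitter: the common functional characterisation of both programs.
def pvRef : List String → List (List String)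
  | [] => []
  | x :: xs => if x = "" then [] :: pvRef xs else pvCur [x] (pvRef xs)

-- ---- A = pvRef ----
def pvRefWith (cur : List String) : List String → List (List String)
  | [] => []
  | x :: xs => if x = "" then cur :: pvRefWith [] xs else pvRefWith (cur ++ [x]) xs

lemma pvFoldA (xs : List String) : ∀ (acc : List (List String)) (cur : List String),
    (xs.foldl
      (fun (st : List (List String) × List String) i =>
        if i = "" then (st.1 ++ [st.2], ([] : List String))
        else (st.1, st.2 ++ [i])) (acc, cur)).1 = acc ++ pvRefWith cur xs := by
  induction xs with
  | nil => intro acc cur; simp [pvRefWith]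
  | cons x xs ih =>
    intro acc cur
    by_cases hx : x = "" <;> simp [pvRefWith, hx, ih]

lemma pvRefWith_eq (xs : List String) : ∀ cur, pvRefWith cur xs = pvCur cur (pvRef xs) := by
  induction xs with
  | nil => intro cur; simp [pvRefWith, pvRef, pvCur]
  | cons x xs ih =>
    intro cur
    by_cases hx : x = ""
    · simp only [pvRefWith, pvRef, hx, ih, pvCur_nil_left]
      simp [pvCur]
    · simp only [pvRefWith, pvRef, if_neg hx, ih, ← pvCur_append]

lemma parse_eq_ref (l : List String) : parse l = pvRef l := by
  unfold parse
  rw [pvFoldA l [] [], pvRefWith_eq, pvCur_nil_left]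
  simp

-- ---- B = pvRef ----
def pvGo (L : List String) (prev : Int) : List Int → List (List String)
  | [] => []
  | s :: ss => PySem.List.slice L (some (prev + 1)) (some s) :: pvGo L s ss

lemma pvFoldB (L : List String) (ss : List Int) :
    ∀ (acc : List (List String)) (prev : Int),
    (ss.foldl
      (fun (st : List (List String) × Int) s =>
        (st.1 ++ [PySem.List.slice L (some (st.2 + 1)) (some s)], s)) (acc, prev)).1
      = acc ++ pvGo L prev ss := by
  induction ss with
  | nil => intro acc prev; simp [pvGo]
  | cons s ss ih => intro acc prev; simp [pvGo, ih]

def pvSeps (s : Int) (l : List String) : List Int :=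
  ((PySem.List.enumerate l s).filter (fun p => p.2 = "")).map (·.1)

lemma pvSeps_nil (s : Int) : pvSeps s [] = [] := by simp [pvSeps, PySem.List.enumerate_nil]

lemma pvSeps_cons (s : Int) (x : String) (xs : List String) :
    pvSeps s (x :: xs) = if x = "" then s :: pvSeps (s + 1) xs else pvSeps (s + 1) xs := by
  by_cases hx : x = "" <;>
    simp [pvSeps, PySem.List.enumerate_cons, hx]

lemma pvSeps_mem (l : List String) (q : Nat) (s : Int) (h : s ∈ pvSeps (q : Int) l) :
    ∃ k : Nat, s = (q : Int) + (k : Int) := by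
  simp only [pvSeps, List.mem_map, List.mem_filter] at h
  obtain ⟨p, ⟨hp, _⟩, rfl⟩ := h
  rw [PySem.List.mem_enumerate_iff] at hp
  obtain ⟨k, _, rfl⟩ := hp
  exact ⟨k, rfl⟩

lemma pvGo_eq_ref (L : List String) : ∀ (l : List String) (p : Nat), L.drop p = l →
    pvGo L ((p : Int) - 1) (pvSeps (p : Int) l) = pvRef l := by
  intro l
  induction l with
  | nil => intro p _; simp [pvSeps_nil, pvGo, pvRef]
  | cons x xs ih =>
    intro p hdrop
    have hdrop' : L.drop (p + 1) = xs := by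
      have h : L.drop (p + 1) = (L.drop p).drop 1 := by rw [List.drop_drop]
      rw [h, hdrop]; rfl
    have hih := ih (p + 1) hdrop'
    rw [pvSeps_cons]
    by_cases hx : x = ""
    · -- separator at index p: empty slice, then continue with prev = p
      rw [if_pos hx]
      have hr : pvRef (x :: xs) = [] :: pvRef xs := by simp [pvRef, hx]
      rw [hr]
      simp only [pvGo]
      have h1 : ((p : Int) - 1 + 1) = ((p : Int)) := by ring
      have hsl : PySem.List.slice L (some ((p : Int) - 1 + 1)) (some ((p : Int))) = [] := by
        rw [h1, PySem.List.slice_natCast]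
        simp
      rw [hsl]
      congr 1
      have hc : ((p : Int) + 1) = (((p + 1 : Nat)) : Int) := by push_cast; ring
      have h2 : ((p : Int)) = (((p + 1 : Nat)) : Int) - 1 := by push_cast; ring
      rw [hc, h2]
      exact hih
    · rw [if_neg hx]
      have hr : pvRef (x :: xs) = pvCur [x] (pvRef xs) := by simp [pvRef, hx]
      rw [hr]
      have hc : ((p : Int) + 1) = (((p + 1 : Nat)) : Int) := by push_cast; ring
      rw [hc]
      cases hseps : pvSeps (((p + 1 : Nat)) : Int) xs with
      | nil =>
        rw [hseps] at hih
        simp only [pvGo] at hih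
        rw [← hih]
        simp [pvGo, pvCur]
      | cons s ss =>
        rw [hseps] at hih
        obtain ⟨k, rfl⟩ := pvSeps_mem xs (p + 1) s (hseps ▸ List.mem_cons_self ..)
        simp only [pvGo] at hih ⊢
        rw [← hih]
        simp only [pvCur]
        have h1 : ((p : Int) - 1 + 1) = ((p : Int)) := by ring
        have h2 : (((p + 1 : Nat)) : Int) - 1 + 1 = (((p + 1 : Nat)) : Int) := by ring
        rw [h1, h2]
        congr 1
        -- head slices: L[p : p+1+k] = x :: L[p+1 : p+1+k]
        have e1 : (((p + 1 : Nat)) : Int) + (k : Int) = ((p : Int)) + (((k + 1 : Nat)) : Int) := by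
          push_cast; ring
        rw [PySem.List.slice_natCast_add, hdrop', e1, PySem.List.slice_natCast_add, hdrop]
        simp

lemma parse_alt_eq_ref (l : List String) : parse_alt l = pvRef l := by
  unfold parse_alt
  rw [pvFoldB]
  have h1 : ((PySem.List.enumerate l 0).filter (fun p => p.2 = "")).map (·.1)
      = pvSeps ((0 : Nat) : Int) l := by simp [pvSeps]
  have h0 : (-1 : Int) = ((0 : Nat) : Int) - 1 := by simp
  rw [h1, h0, pvGo_eq_ref l l 0 (by simp)]
  simp

-- ===== VERDICT (by name: the statement is the Claim_ definition above) =====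
theorem parse_spec : Claim_equal_parse := by
  intro l _
  unfold Spec_parse
  rw [parse_eq_ref, parse_alt_eq_ref]
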